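-- pv_equiv track=rewrite | github.com/Mockingbird01001/PacMan-reinforcement-learning | qlearningAgents.py | getPosGame
-- ===== SOURCE A (Python) =====
-- def getPosGame(state):
--   # Parcourt la liste et renvoie les coordonnees interressantes
--   PacX, PacY = 0, 0
--   PacMan = ['^', '<', '>', 'v']
--   g = []
--   cap = []
--   for x in range(len(state)):
--     for y in range(len(state[0])):
--       if state[x][y] in PacMan:
--         PacX = x
--         PacY = y
--       elif state[x][y] == "G":
--         g.append((x,y))
--       elif state[x][y] == "." or state[x][y] == "o":
--         cap.append((x,y))
--   return (PacX, PacY, g, cap)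
-- ===== SOURCE B (Python) =====
-- def getPosGame(state):
--   # Three separate passes: one scan for pacman (last match wins, row-major),
--   # then two comprehensions collecting ghosts and food.
--   rows = len(state)
--   cols = len(state[0]) if state else 0
--   PacX, PacY = 0, 0
--   for x in range(rows):
--     for y in range(cols):
--       if state[x][y] in ('^', '<', '>', 'v'):
--         PacX, PacY = x, y
--   g = [(x, y) for x in range(rows) for y in range(cols) if state[x][y] == "G"]
--   cap = [(x, y) for x in range(rows) for y in range(cols) if state[x][y] in (".", "o")]
--   return (PacX, PacY, g, cap)
-- ===== Notes on version B (the rewrite author's own statement) =====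
-- stated objective: alternative
-- what changed: The single nested loop with a four-field accumulator is decomposed into three independent passes: a pacman scan keeping the last match, and two comprehensions collecting ghost and food coordinates.
import Mathlib
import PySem

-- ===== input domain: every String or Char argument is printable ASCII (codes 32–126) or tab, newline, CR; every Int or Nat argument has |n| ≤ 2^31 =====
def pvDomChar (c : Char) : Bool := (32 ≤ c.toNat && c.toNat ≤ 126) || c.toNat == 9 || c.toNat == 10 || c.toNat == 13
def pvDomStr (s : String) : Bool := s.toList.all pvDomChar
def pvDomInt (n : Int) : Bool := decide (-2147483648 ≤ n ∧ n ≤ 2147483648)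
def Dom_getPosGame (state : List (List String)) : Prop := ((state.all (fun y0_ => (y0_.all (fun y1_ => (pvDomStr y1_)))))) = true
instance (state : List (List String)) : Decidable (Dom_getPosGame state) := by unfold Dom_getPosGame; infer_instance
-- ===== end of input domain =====

-- B decomposes A's single nested loop into three independent passes (pacman scan, ghost comprehension, food comprehension); return values agree on all non-ragged grids.

-- ===== PORT A =====
-- single nested loop mutating (PacX, PacY, g, cap)
def getPosGame (state : List (List String)) : Int × Int × (List (Int × Int)) × (List (Int × Int)) :=
  (PySem.List.pyRange 0 state.length 1).foldl (fun s x =>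
    (PySem.List.pyRange 0 (PySem.List.pyGetD state 0 []).length 1).foldl (fun s y =>
      let c := PySem.List.pyGetD (PySem.List.pyGetD state x []) y ""
      if c ∈ ["^", "<", ">", "v"] then (x, y, s.2.2.1, s.2.2.2)
      else if c = "G" then (s.1, s.2.1, s.2.2.1 ++ [(x, y)], s.2.2.2)
      else if c = "." ∨ c = "o" then (s.1, s.2.1, s.2.2.1, s.2.2.2 ++ [(x, y)])
      else s) s) ((0 : Int), (0 : Int), ([] : List (Int × Int)), ([] : List (Int × Int)))

-- ===== PORT B =====
-- three passes: pacman last-match scan, then two comprehensions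
def getPosGame_alt (state : List (List String)) : Int × Int × (List (Int × Int)) × (List (Int × Int)) :=
  let rows : Int := state.length
  let cols : Int := if state = [] then 0 else (state.headD []).length
  let pac := (PySem.List.pyRange 0 rows 1).foldl (fun pq x =>
    (PySem.List.pyRange 0 cols 1).foldl (fun pq y =>
      if PySem.List.pyGetD (PySem.List.pyGetD state x []) y "" ∈ ["^", "<", ">", "v"] then (x, y) else pq) pq)
    ((0 : Int), (0 : Int))
  let g := (PySem.List.pyRange 0 rows 1).flatMap (fun x =>
    ((PySem.List.pyRange 0 cols 1).filter (fun y =>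
      PySem.List.pyGetD (PySem.List.pyGetD state x []) y "" = "G")).map (fun y => (x, y)))
  let cap := (PySem.List.pyRange 0 rows 1).flatMap (fun x =>
    ((PySem.List.pyRange 0 cols 1).filter (fun y =>
      PySem.List.pyGetD (PySem.List.pyGetD state x []) y "" ∈ [".", "o"])).map (fun y => (x, y)))
  (pac.1, pac.2, g, cap)

-- ===== PRECONDITION & SPEC =====
-- Pre_ excludes ragged grids whose first row is longer than some later row: there Python A raises IndexError (and B raises too).
def Pre_getPosGame (state : List (List String)) : Prop :=
  ∀ row ∈ state, (state.headD []).length ≤ row.length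
instance (state : List (List String)) : Decidable (Pre_getPosGame state) := by unfold Pre_getPosGame; infer_instance
def pvWitness_getPosGame : List (List String) := [["^", "."], ["G", "o"]]
def Spec_getPosGame (state : List (List String)) (out : Int × Int × (List (Int × Int)) × (List (Int × Int))) : Prop := out = getPosGame_alt state
instance (state : List (List String)) (out : Int × Int × (List (Int × Int)) × (List (Int × Int))) : Decidable (Spec_getPosGame state out) := by unfold Spec_getPosGame; infer_instance

-- ===== CLAIM (what is proved, stated in full; the proofs are below) =====
def Claim_equal_getPosGame : Prop := ∀ (state : List (List String)), Dom_getPosGame state → Pre_getPosGame state → Spec_getPosGame state (getPosGame state)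

-- ===== LEMMAS AND PROOFS =====

-- inner loop over an arbitrary list of column indices, for a fixed row x and the cell function f
theorem pv_inner (f : Int → String) (x : Int) (ys : List Int)
    (p q : Int) (G C : List (Int × Int)) :
    ys.foldl (fun s y =>
      if f y ∈ ["^", "<", ">", "v"] then (x, y, s.2.2.1, s.2.2.2)
      else if f y = "G" then (s.1, s.2.1, s.2.2.1 ++ [(x, y)], s.2.2.2)
      else if f y = "." ∨ f y = "o" then (s.1, s.2.1, s.2.2.1, s.2.2.2 ++ [(x, y)])
      else s) (p, q, G, C)
    = (ys.foldl (fun pq y => if f y ∈ ["^", "<", ">", "v"] then (x, y) else pq) (p, q)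
       |> fun pq => (pq.1, pq.2,
            G ++ (ys.filter (fun y => f y = "G")).map (fun y => (x, y)),
            C ++ (ys.filter (fun y => f y ∈ [".", "o"])).map (fun y => (x, y)))) := by
  induction ys generalizing p q G C with
  | nil => simp
  | cons y ys ih =>
    by_cases h1 : f y ∈ ["^", "<", ">", "v"]
    · have h2 : ¬ (decide (f y = "G") = true) := by
        simp at h1 ⊢; rcases h1 with h | h | h | h <;> simp [h]
      have h3 : ¬ (decide (f y ∈ [".", "o"]) = true) := by
        simp at h1 ⊢; rcases h1 with h | h | h | h <;> simp [h]
      simp only [List.foldl_cons, if_pos h1, List.filter_cons, h2, h3, if_neg]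
      exact ih _ _ _ _
    · by_cases h2 : f y = "G"
      · have h3 : ¬ (f y = "." ∨ f y = "o") := by simp [h2]
        simp only [List.foldl_cons, if_neg h1, if_pos h2, if_neg h3, List.filter_cons]
        simp only [h2, decide_true, if_true]
        have h4 : ¬ (decide (f y ∈ [".", "o"]) = true) := by simp [h2]
        simp only [h4, if_neg, not_false_iff, List.map_append, List.map_cons, List.map_nil]
        rw [ih]
        simp
      · by_cases h3 : f y = "." ∨ f y = "o"
        · simp only [List.foldl_cons, if_neg h1, if_neg h2, if_pos h3, List.filter_cons]
          have h4 : ¬ (decide (f y = "G") = true) := by simp [h2]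
          have h5 : decide (f y ∈ [".", "o"]) = true := by simpa using h3
          simp only [h4, h5, if_neg, not_false_iff, if_true, List.map_cons]
          rw [ih]
          simp
        · simp only [List.foldl_cons, if_neg h1, if_neg h2, if_neg h3, List.filter_cons]
          have h4 : ¬ (decide (f y = "G") = true) := by simp [h2]
          have h5 : ¬ (decide (f y ∈ [".", "o"]) = true) := by
            simp only [decide_eq_true_eq]; exact fun h => h3 (by simpa using h)
          simp only [h4, h5]
          exact ih _ _ _ _

-- outer loop over an arbitrary list of row indices
theorem pv_outer (f : Int → Int → String) (xs ys : List Int)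
    (p q : Int) (G C : List (Int × Int)) :
    xs.foldl (fun s x =>
      ys.foldl (fun s y =>
        if f x y ∈ ["^", "<", ">", "v"] then (x, y, s.2.2.1, s.2.2.2)
        else if f x y = "G" then (s.1, s.2.1, s.2.2.1 ++ [(x, y)], s.2.2.2)
        else if f x y = "." ∨ f x y = "o" then (s.1, s.2.1, s.2.2.1, s.2.2.2 ++ [(x, y)])
        else s) s) (p, q, G, C)
    = (xs.foldl (fun pq x =>
         ys.foldl (fun pq y => if f x y ∈ ["^", "<", ">", "v"] then (x, y) else pq) pq) (p, q)
       |> fun pq => (pq.1, pq.2,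
            G ++ xs.flatMap (fun x => ((ys.filter (fun y => f x y = "G")).map (fun y => (x, y)))),
            C ++ xs.flatMap (fun x => ((ys.filter (fun y => f x y ∈ [".", "o"])).map (fun y => (x, y)))))) := by
  induction xs generalizing p q G C with
  | nil => simp
  | cons x xs ih =>
    simp only [List.foldl_cons]
    rw [pv_inner (f x) x ys p q G C]
    simp only []
    rw [ih]
    simp

-- ===== VERDICT (by name: the statement is the Claim_ definition above) =====
theorem getPosGame_spec : Claim_equal_getPosGame := by
  intro state _ _
  unfold Spec_getPosGame getPosGame getPosGame_alt
  have hcols : (if state = [] then (0 : Int) else ((state.headD []).length : Int))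
      = ((PySem.List.pyGetD state 0 []).length : Int) := by
    cases state with
    | nil => simp [PySem.List.pyGetD]
    | cons r rs => simp [PySem.List.pyGetD_zero]
  simp only [hcols]
  rw [pv_outer (fun x y => PySem.List.pyGetD (PySem.List.pyGetD state x []) y "")]
  simp
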